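-- pv_equiv track=rewrite | github.com/CodyKlimkofski/AdventOfCode-2015 | day5/string_determiner.py | _has_repeated_pair
-- ===== SOURCE A (Python) =====
-- def _has_repeated_pair(text):
--     pairs = {}
--     for i in range(len(text) - 1):
--         pair = text[i:i + 2]
--         if pair in pairs:
--             if i - pairs[pair] > 1:
--                 return True
--         else:
--             pairs[pair] = i
--     return False
-- ===== SOURCE B (Python) =====
-- def _has_repeated_pair(text):
--     for i in range(len(text) - 1):
--         if text[i:i + 2] in text[i + 2:]:
--             return True
--     return False
-- ===== Notes on version B (the rewrite author's own statement) =====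
-- stated objective: simpler
-- what changed: Replaces the first-occurrence dict with a table-free nested scan: for each position the two-char pair is searched as a substring of the suffix starting two characters later.
import Mathlib
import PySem

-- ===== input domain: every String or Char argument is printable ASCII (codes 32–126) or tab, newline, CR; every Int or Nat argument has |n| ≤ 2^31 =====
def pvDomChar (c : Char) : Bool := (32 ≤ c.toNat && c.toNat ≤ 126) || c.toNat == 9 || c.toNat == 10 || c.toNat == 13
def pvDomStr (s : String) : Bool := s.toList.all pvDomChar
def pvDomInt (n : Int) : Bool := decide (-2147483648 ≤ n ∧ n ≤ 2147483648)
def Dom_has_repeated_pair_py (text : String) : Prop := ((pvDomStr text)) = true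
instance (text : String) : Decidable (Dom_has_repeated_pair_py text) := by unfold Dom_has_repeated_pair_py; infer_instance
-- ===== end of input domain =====

-- B replaces A's first-occurrence dict by a table-free nested scan (substring search in the
-- suffix starting two characters later); objective: simpler. Return values proved equal on all inputs.

-- ===== PORT A =====
-- loop 'for i in range(len(text)-1)' with the first-occurrence dict 'pairs'
def hrpAGo (cs : List Char) : List Int → PySem.Dict (List Char) Int → Bool
  | [], _ => false
  | i :: rest, pairs =>
    let pair := PySem.List.slice cs (some i) (some (i + 2))
    match pairs.get? pair with
    | some j => if i - j > 1 then true else hrpAGo cs rest pairs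
    | none => hrpAGo cs rest (pairs.insert pair i)

def has_repeated_pair_py (text : String) : Bool :=
  hrpAGo text.toList (PySem.List.pyRange 0 (PySem.Str.len text - 1) 1) PySem.Dict.empty

-- ===== PORT B =====
-- loop 'for i in range(len(text)-1)': 'text[i:i+2] in text[i+2:]'
def hrpBGo (cs : List Char) : List Int → Bool
  | [] => false
  | i :: rest =>
    if PySem.Chars.isIn (PySem.List.slice cs (some i) (some (i + 2)))
        (PySem.List.slice cs (some (i + 2)) none) then true
    else hrpBGo cs rest

def has_repeated_pair_py_alt (text : String) : Bool :=
  hrpBGo text.toList (PySem.List.pyRange 0 (PySem.Str.len text - 1) 1)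

-- ===== PRECONDITION & SPEC =====
def Spec_has_repeated_pair_py (text : String) (out : Bool) : Prop := out = has_repeated_pair_py_alt text
instance (text : String) (out : Bool) : Decidable (Spec_has_repeated_pair_py text out) := by unfold Spec_has_repeated_pair_py; infer_instance

-- ===== CLAIM (what is proved, stated in full; the proofs are below) =====
def Claim_equal_has_repeated_pair_py : Prop := ∀ (text : String), Dom_has_repeated_pair_py text → Spec_has_repeated_pair_py text (has_repeated_pair_py text)

-- ===== LEMMAS AND PROOFS =====

-- the two-character pair starting at index k
def hrpPr (cs : List Char) (k : Nat) : List Char := (cs.drop k).take 2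

-- "some pair repeats with a gap of at least two" (shared characterization of both programs)
def hrpGood (cs : List Char) : Prop :=
  ∃ k m : Nat, k + 2 ≤ m ∧ m + 2 ≤ cs.length ∧ hrpPr cs k = hrpPr cs m

-- A-side: "some index i ≥ m0 sees its pair's FIRST occurrence at distance ≥ 2"
def hrpGoodFrom (cs : List Char) (m0 : Nat) : Prop :=
  ∃ i j : Nat, m0 ≤ i ∧ i + 1 < cs.length ∧ j + 2 ≤ i ∧ hrpPr cs j = hrpPr cs i ∧
    ∀ j' < j, hrpPr cs j' ≠ hrpPr cs i

-- A's dict invariant: after processing indices < m, get? p is the first occurrence of pair p among them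
def hrpInv (cs : List Char) (m : Nat) (pairs : PySem.Dict (List Char) Int) : Prop :=
  ∀ p j, pairs.get? p = some j ↔
    ∃ jn : Nat, j = (jn : Int) ∧ jn < m ∧ hrpPr cs jn = p ∧ ∀ j' < jn, hrpPr cs j' ≠ p

lemma hrpSlice_eq_pr (cs : List Char) (m : Nat) :
    PySem.List.slice cs (some (m : Int)) (some ((m : Int) + 2)) = hrpPr cs m := by
  have h : ((m : Int)) + 2 = ((m + 2 : Nat) : Int) := by push_cast; ring
  rw [h, PySem.List.slice_natCast, hrpPr]
  congr 1
  omega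

lemma hrpLen_pr (cs : List Char) (k : Nat) (h : k + 2 ≤ cs.length) :
    (hrpPr cs k).length = 2 := by
  simp [hrpPr]
  omega

-- B's loop returns true iff some index in the list passes the substring test
lemma hrpBGo_iff (cs : List Char) (is : List Int) :
    hrpBGo cs is = true ↔ ∃ i ∈ is,
      PySem.Chars.isIn (PySem.List.slice cs (some i) (some (i + 2)))
        (PySem.List.slice cs (some (i + 2)) none) = true := by
  induction is with
  | nil => simp [hrpBGo]
  | cons i rest ih =>
    rw [hrpBGo]
    by_cases h : PySem.Chars.isIn (PySem.List.slice cs (some i) (some (i + 2)))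
        (PySem.List.slice cs (some (i + 2)) none) = true
    · simp [h]
    · simp [h, ih]

-- the substring test at a genuine index k is exactly "pair k recurs somewhere ≥ k+2"
lemma hrpTest_iff (cs : List Char) (k : Nat) (hk : k + 2 ≤ cs.length) :
    PySem.Chars.isIn (PySem.List.slice cs (some (k : Int)) (some ((k : Int) + 2)))
        (PySem.List.slice cs (some ((k : Int) + 2)) none) = true ↔
      ∃ m : Nat, k + 2 ≤ m ∧ m + 2 ≤ cs.length ∧ hrpPr cs k = hrpPr cs m := by
  have h2 : ((k : Int)) + 2 = ((k + 2 : Nat) : Int) := by push_cast; ring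
  rw [hrpSlice_eq_pr, h2, PySem.List.slice_from_natCast,
      ← PySem.Chars.exists_prefix_drop_iff_isIn]
  constructor
  · rintro ⟨j, hj⟩
    rw [List.drop_drop, List.prefix_iff_eq_take, hrpLen_pr cs k hk] at hj
    have hlen2 := congrArg List.length hj
    rw [hrpLen_pr cs k hk] at hlen2
    simp only [List.length_take, List.length_drop] at hlen2
    refine ⟨k + 2 + j, by omega, by omega, ?_⟩
    simp only [hrpPr] at hj ⊢
    exact hj
  · rintro ⟨m, hkm, hm, heq⟩
    refine ⟨m - (k + 2), ?_⟩
    have hD : (cs.drop (k + 2)).drop (m - (k + 2)) = cs.drop m := by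
      rw [List.drop_drop]
      congr 1
      omega
    rw [hD, heq, hrpPr]
    exact List.take_prefix _ _

-- B computes hrpGood
lemma hrpB_char (cs : List Char) :
    hrpBGo cs (PySem.List.pyRange 0 ((cs.length : Int) - 1) 1) = true ↔ hrpGood cs := by
  rw [hrpBGo_iff]
  constructor
  · rintro ⟨i, hmem, htest⟩
    rw [PySem.List.mem_pyRange_one] at hmem
    obtain ⟨h0, hlt⟩ := hmem
    have hik : i = ((i.toNat : Nat) : Int) := by omega
    rw [hik] at htest
    have hk : i.toNat + 2 ≤ cs.length := by omega
    obtain ⟨m, h1, h2, h3⟩ := (hrpTest_iff cs i.toNat hk).mp htest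
    exact ⟨i.toNat, m, h1, h2, h3⟩
  · rintro ⟨k, m, hkm, hm, heq⟩
    refine ⟨(k : Int), ?_, ?_⟩
    · rw [PySem.List.mem_pyRange_one]; omega
    · exact (hrpTest_iff cs k (by omega)).mpr ⟨m, hkm, hm, heq⟩

-- A's loop, with the invariant, decides hrpGoodFrom
lemma hrpAGo_iff (cs : List Char) (r : Nat) :
    ∀ (m : Nat) (pairs : PySem.Dict (List Char) Int),
      (((cs.length : Int) - 1) - (m : Int)).toNat = r → hrpInv cs m pairs →
      (hrpAGo cs (PySem.List.pyRange (m : Int) ((cs.length : Int) - 1) 1) pairs = true ↔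
        hrpGoodFrom cs m) := by
  induction r with
  | zero =>
    intro m pairs hr _
    have hge : (cs.length : Int) - 1 ≤ (m : Int) := by omega
    rw [PySem.List.pyRange_one_eq_nil hge]
    simp only [hrpAGo, Bool.false_eq_true, false_iff]
    rintro ⟨i, j, hmi, hi, _⟩
    omega
  | succ r ih =>
    intro m pairs hr hInv
    have hlt : (m : Int) < (cs.length : Int) - 1 := by omega
    rw [PySem.List.pyRange_one_cons hlt]
    simp only [hrpAGo]
    rw [hrpSlice_eq_pr]
    have hm1 : ((m : Int)) + 1 = ((m + 1 : Nat) : Int) := by push_cast; ring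
    cases hget : pairs.get? (hrpPr cs m) with
    | some j =>
      simp only [hget]
      obtain ⟨jn, rfl, hjm, hjeq, hjmin⟩ := (hInv _ _).mp hget
      by_cases hgap : (m : Int) - (jn : Int) > 1
      · rw [if_pos hgap]
        constructor
        · intro _
          exact ⟨m, jn, le_refl m, by omega, by omega, hjeq, hjmin⟩
        · intro _; rfl
      · rw [if_neg hgap]
        have hInv' : hrpInv cs (m + 1) pairs := by
          intro p j
          rw [hInv p j]
          constructor
          · rintro ⟨kn, rfl, hk, hkp, hkmin⟩
            exact ⟨kn, rfl, by omega, hkp, hkmin⟩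
          · rintro ⟨kn, rfl, hk, hkp, hkmin⟩
            refine ⟨kn, rfl, ?_, hkp, hkmin⟩
            rcases Nat.lt_or_ge kn m with h | h
            · exact h
            · exfalso
              have hkm : kn = m := by omega
              subst hkm
              exact hkmin jn hjm (hjeq.trans hkp)
        rw [hm1, ih (m + 1) pairs (by omega) hInv']
        constructor
        · rintro ⟨i, j', hmi, hi, hgap', hpe, hpmin⟩
          exact ⟨i, j', by omega, hi, hgap', hpe, hpmin⟩
        · rintro ⟨i, j', hmi, hi, hgap', hpe, hpmin⟩
          rcases Nat.lt_or_ge m i with h | h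
          · exact ⟨i, j', by omega, hi, hgap', hpe, hpmin⟩
          · have him : i = m := by omega
            subst him
            have hj' : j' = jn := by
              rcases Nat.lt_trichotomy j' jn with h' | h' | h'
              · exact absurd hpe (hjmin j' h')
              · exact h'
              · exact absurd hjeq (hpmin jn h')
            omega
    | none =>
      simp only [hget]
      -- pr m is fresh: no occurrence among indices < m
      have hfresh : ∀ j' < m, hrpPr cs j' ≠ hrpPr cs m := by
        intro j' hj' hne
        have hex : ∃ j'', hrpPr cs j'' = hrpPr cs m := ⟨j', hne⟩
        have hfind := Nat.find_spec hex
        have hle : Nat.find hex ≤ j' := Nat.find_min' hex hne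
        have : pairs.get? (hrpPr cs m) = some ((Nat.find hex : Nat) : Int) := by
          rw [hInv]
          exact ⟨Nat.find hex, rfl, by omega, hfind, fun a ha hc => Nat.find_min hex ha hc⟩
        rw [hget] at this
        simp at this
      have hInv' : hrpInv cs (m + 1) (pairs.insert (hrpPr cs m) (m : Int)) := by
        intro p j
        rw [PySem.Dict.get?_insert]
        by_cases hp : p = hrpPr cs m
        · subst hp
          rw [if_pos rfl]
          constructor
          · rintro h
            injection h with h
            exact ⟨m, h.symm, by omega, rfl, hfresh⟩
          · rintro ⟨kn, rfl, hk, hkp, hkmin⟩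
            have hknm : kn = m := by
              rcases Nat.lt_or_ge kn m with h | h
              · exact absurd hkp (hfresh kn h)
              · omega
            subst hknm
            rfl
        · rw [if_neg hp, hInv p j]
          constructor
          · rintro ⟨kn, rfl, hk, hkp, hkmin⟩
            exact ⟨kn, rfl, by omega, hkp, hkmin⟩
          · rintro ⟨kn, rfl, hk, hkp, hkmin⟩
            refine ⟨kn, rfl, ?_, hkp, hkmin⟩
            rcases Nat.lt_or_ge kn m with h | h
            · exact h
            · exfalso
              have hknm : kn = m := by omega
              subst hknm
              exact hp hkp.symm
      rw [hm1, ih (m + 1) _ (by omega) hInv']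
      constructor
      · rintro ⟨i, j', hmi, hi, hgap', hpe, hpmin⟩
        exact ⟨i, j', by omega, hi, hgap', hpe, hpmin⟩
      · rintro ⟨i, j', hmi, hi, hgap', hpe, hpmin⟩
        rcases Nat.lt_or_ge m i with h | h
        · exact ⟨i, j', by omega, hi, hgap', hpe, hpmin⟩
        · have him : i = m := by omega
          subst him
          exact absurd hpe (hfresh j' (by omega))

lemma hrpGood_iff_goodFrom (cs : List Char) : hrpGood cs ↔ hrpGoodFrom cs 0 := by
  constructor
  · rintro ⟨k, m, hkm, hm, heq⟩
    have hex : ∃ j, hrpPr cs j = hrpPr cs m := ⟨k, heq⟩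
    refine ⟨m, Nat.find hex, Nat.zero_le m, by omega, ?_, Nat.find_spec hex,
      fun a ha => Nat.find_min hex ha⟩
    have : Nat.find hex ≤ k := Nat.find_min' hex heq
    omega
  · rintro ⟨i, j, _, hi, hgap, heq, _⟩
    exact ⟨j, i, hgap, by omega, heq⟩

lemma hrpInv_empty (cs : List Char) : hrpInv cs 0 PySem.Dict.empty := by
  intro p j
  rw [PySem.Dict.get?_empty]
  constructor
  · intro h
    simp at h
  · rintro ⟨kn, _, hk, _⟩
    omega

-- ===== VERDICT (by name: the statement is the Claim_ definition above) =====
theorem has_repeated_pair_py_spec : Claim_equal_has_repeated_pair_py := by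
  intro text _
  unfold Spec_has_repeated_pair_py has_repeated_pair_py has_repeated_pair_py_alt
  have hlen : PySem.Str.len text - 1 = (text.toList.length : Int) - 1 := by
    simp [PySem.Str.len_eq]
  rw [hlen]
  have h0 : ((0 : Nat) : Int) = 0 := rfl
  have hA := hrpAGo_iff text.toList (((text.toList.length : Int) - 1 - ((0 : Nat) : Int)).toNat)
    0 PySem.Dict.empty rfl (hrpInv_empty text.toList)
  have hB := hrpB_char text.toList
  rw [h0] at hA
  rw [Bool.eq_iff_iff, hA, hB, hrpGood_iff_goodFrom]
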